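-- pv_equiv track=rewrite | github.com/mortyc126-debug/SHA | nk_p1_p2_verify.py | count_gpk
-- ===== SOURCE A (Python) =====
-- def count_gpk(a_val, b_val):
--     """Count G, P, K symbols and return P-count (= undetermined carry bits)."""
--     g=p=k=0
--     for bit in range(32):
--         ab=(a_val>>bit)&1; bb=(b_val>>bit)&1
--         if ab==1 and bb==1: g+=1
--         elif ab==0 and bb==0: k+=1
--         else: p+=1
--     return g, p, k
-- ===== SOURCE B (Python) =====
-- def count_gpk(a_val, b_val):
--     """Count G, P, K symbols and return P-count (= undetermined carry bits)."""
--     mask = 0xFFFFFFFF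
--     g = (a_val & b_val & mask).bit_count()
--     k = (~a_val & ~b_val & mask).bit_count()
--     return g, 32 - g - k, k
-- ===== Notes on version B (the rewrite author's own statement) =====
-- stated objective: alternative
-- what changed: Replaces the 32-iteration bit-serial classification loop with three bit-parallel mask operations and two popcounts: g = popcount(a&b&mask), k = popcount(~a&~b&mask), p = 32-g-k.
import Mathlib
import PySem

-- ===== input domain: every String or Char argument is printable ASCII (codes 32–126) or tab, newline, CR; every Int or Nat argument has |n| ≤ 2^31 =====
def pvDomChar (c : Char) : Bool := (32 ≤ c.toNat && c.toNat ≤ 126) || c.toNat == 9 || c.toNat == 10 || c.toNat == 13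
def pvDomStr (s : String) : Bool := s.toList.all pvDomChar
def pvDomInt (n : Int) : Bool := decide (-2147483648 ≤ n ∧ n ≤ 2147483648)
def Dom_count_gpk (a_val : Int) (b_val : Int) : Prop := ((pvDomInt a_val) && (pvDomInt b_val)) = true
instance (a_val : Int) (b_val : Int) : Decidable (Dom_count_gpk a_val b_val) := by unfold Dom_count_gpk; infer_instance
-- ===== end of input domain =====

-- B replaces A's 32-iteration bit-serial classification loop by bit-parallel masking and two
-- popcounts (g = popcount(a&b&mask), k = popcount(~a&~b&mask), p = 32-g-k): a different algorithm.

-- ===== PORT A =====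
-- bit ∈ range(32) is nonnegative, so shifting by bit.toNat is the exact Python shift.
def count_gpk (a_val : Int) (b_val : Int) : Int × Int × Int :=
  (PySem.List.pyRange 0 32 1).foldl
    (fun (s : Int × Int × Int) bit =>
      let ab := PySem.Int.band (a_val >>> bit.toNat) 1
      let bb := PySem.Int.band (b_val >>> bit.toNat) 1
      if ab = 1 ∧ bb = 1 then (s.1 + 1, s.2.1, s.2.2)
      else if ab = 0 ∧ bb = 0 then (s.1, s.2.1, s.2.2 + 1)
      else (s.1, s.2.1 + 1, s.2.2))
    (0, 0, 0)

-- ===== PORT B =====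
def count_gpk_alt (a_val : Int) (b_val : Int) : Int × Int × Int :=
  let mask : Int := 4294967295
  let g : Int := (PySem.Int.bitCount (PySem.Int.band (PySem.Int.band a_val b_val) mask) : Int)
  let k : Int := (PySem.Int.bitCount (PySem.Int.band (PySem.Int.band (Int.not a_val) (Int.not b_val)) mask) : Int)
  (g, 32 - g - k, k)

-- ===== PRECONDITION & SPEC =====
def Spec_count_gpk (a_val : Int) (b_val : Int) (out : Int × Int × Int) : Prop := out = count_gpk_alt a_val b_val
instance (a_val : Int) (b_val : Int) (out : Int × Int × Int) : Decidable (Spec_count_gpk a_val b_val out) := by unfold Spec_count_gpk; infer_instance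

-- ===== CLAIM (what is proved, stated in full; the proofs are below) =====
def Claim_equal_count_gpk : Prop := ∀ (a_val : Int) (b_val : Int), Dom_count_gpk a_val b_val → Spec_count_gpk a_val b_val (count_gpk a_val b_val)

-- ===== LEMMAS AND PROOFS =====

theorem pvSubLand (m : Nat) : ∀ n : Nat, m - (m &&& n) = m.ldiff n := by
  induction m using Nat.binaryRec with
  | zero =>
    intro n
    have : Nat.ldiff 0 n = 0 := Nat.eq_of_testBit_eq (fun i => by simp [Nat.testBit_ldiff])
    simp [this]
  | bit a m ih =>
    intro n
    induction n using Nat.binaryRec with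
    | zero =>
      have : Nat.ldiff (Nat.bit a m) 0 = Nat.bit a m := Nat.eq_of_testBit_eq (fun i => by simp [Nat.testBit_ldiff])
      simp [this]
    | bit b n _ =>
      rw [Nat.land_bit, Nat.ldiff_bit, ← ih n]
      have h : m &&& n ≤ m := Nat.and_le_left
      cases a <;> cases b <;> simp [Nat.bit_val] <;> omega

theorem pvTestBit_band (u v : Int) (i : Nat) :
    (PySem.Int.band u v).testBit i = (u.testBit i && v.testBit i) := by
  rcases u with m | m <;> rcases v with n | n
  · have h : PySem.Int.band (Int.ofNat m) (Int.ofNat n) = Int.ofNat (m &&& n) := by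
      simp only [PySem.Int.band]
      rw [if_pos (show (0:Int) ≤ Int.ofNat m from Int.ofNat_nonneg m), if_pos (show (0:Int) ≤ Int.ofNat n from Int.ofNat_nonneg n)]
      norm_num
    rw [h]; simp [Int.testBit, Nat.testBit_land]
  · have h : PySem.Int.band (Int.ofNat m) (Int.negSucc n) = Int.ofNat (m.ldiff n) := by
      simp only [PySem.Int.band]
      rw [if_pos (show (0:Int) ≤ Int.ofNat m from Int.ofNat_nonneg m), if_neg (by omega)]
      rw [show (-(Int.negSucc n) - 1).toNat = n from by rw [Int.negSucc_eq]; omega]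
      rw [show (Int.ofNat m).toNat = m from rfl, pvSubLand]; rfl
    rw [h]; simp [Int.testBit, Nat.testBit_ldiff]
  · have h : PySem.Int.band (Int.negSucc m) (Int.ofNat n) = Int.ofNat (n.ldiff m) := by
      simp only [PySem.Int.band]
      rw [if_neg (by omega), if_pos (show (0:Int) ≤ Int.ofNat n from Int.ofNat_nonneg n)]
      rw [show (-(Int.negSucc m) - 1).toNat = m from by rw [Int.negSucc_eq]; omega]
      rw [show (Int.ofNat n).toNat = n from rfl, pvSubLand]; rfl
    rw [h]; simp [Int.testBit, Nat.testBit_ldiff, Bool.and_comm]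
  · have h : PySem.Int.band (Int.negSucc m) (Int.negSucc n) = Int.negSucc (m ||| n) := by
      simp only [PySem.Int.band]
      rw [if_neg (by omega), if_neg (by omega)]
      rw [show (-(Int.negSucc m) - 1).toNat = m from by rw [Int.negSucc_eq]; omega]
      rw [show (-(Int.negSucc n) - 1).toNat = n from by rw [Int.negSucc_eq]; omega]
      rw [Int.negSucc_eq]; omega
    rw [h]; simp [Int.testBit, Nat.testBit_lor]

theorem pvTestBit_not (u : Int) (i : Nat) : (Int.not u).testBit i = !u.testBit i := by
  rcases u with m | m <;> simp [Int.not, Int.testBit]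

theorem pvBand_one_bit (c : Int) : PySem.Int.band c 1 = if c.testBit 0 then 1 else 0 := by
  rcases c with m | m
  · have h : PySem.Int.band (Int.ofNat m) 1 = Int.ofNat (m &&& 1) := by
      simp only [PySem.Int.band]
      rw [if_pos (show (0:Int) ≤ Int.ofNat m from Int.ofNat_nonneg m), if_pos (by omega)]
      rfl
    rw [h, Nat.and_one_is_mod]
    simp only [Int.testBit, Nat.testBit_zero]
    rcases Nat.mod_two_eq_zero_or_one m with h2 | h2 <;> simp [h2]
  · have h : PySem.Int.band (Int.negSucc m) 1 = Int.ofNat (1 - (1 &&& m)) := by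
      simp only [PySem.Int.band]
      rw [if_neg (by omega), if_pos (by omega)]
      rw [show (-(Int.negSucc m) - 1).toNat = m from by rw [Int.negSucc_eq]; omega]
      rfl
    rw [h, Nat.land_comm, Nat.and_one_is_mod]
    simp only [Int.testBit, Nat.testBit_zero]
    rcases Nat.mod_two_eq_zero_or_one m with h2 | h2 <;> simp [h2]

theorem pvBandShift (a : Int) (k : Nat) :
    PySem.Int.band (a >>> ((k : Int))) 1 = if a.testBit k then (1 : Int) else 0 := by
  rw [pvBand_one_bit]
  congr 1
  rcases a with m | m
  · rw [show Int.ofNat m = ((m : Nat) : Int) from rfl, Int.shiftRight_natCast]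
    simp [Int.testBit, Nat.testBit_shiftRight]
  · rw [Int.shiftRight_negSucc]
    simp [Int.testBit, Nat.testBit_shiftRight]

theorem pvMask (c : Int) : ∃ z : Nat, PySem.Int.band c 4294967295 = (z : Int) ∧ z < 2 ^ 32 ∧
    ∀ i : Nat, z.testBit i = (c.testBit i && decide (i < 32)) := by
  have hmask : ∀ i : Nat, (4294967295 : Int).testBit i = decide (i < 32) := by
    intro i
    rw [show (4294967295 : Int) = Int.ofNat 4294967295 from rfl]
    simp only [Int.testBit]
    rw [show (4294967295 : Nat) = 2 ^ 32 - 1 from by norm_num, Nat.testBit_two_pow_sub_one]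
  obtain ⟨z, hz, hlt⟩ : ∃ z : Nat, PySem.Int.band c 4294967295 = (z : Int) ∧ z < 2 ^ 32 := by
    rcases c with m | m
    · refine ⟨m &&& 4294967295, ?_, ?_⟩
      · simp only [PySem.Int.band]
        rw [if_pos (show (0:Int) ≤ Int.ofNat m from Int.ofNat_nonneg m), if_pos (by omega)]
        rfl
      · have := Nat.and_le_right (n := m) (m := 4294967295)
        omega
    · refine ⟨4294967295 - (4294967295 &&& m), ?_, by omega⟩
      · simp only [PySem.Int.band]
        rw [if_neg (by omega), if_pos (by omega)]
        rw [show (-(Int.negSucc m) - 1).toNat = m from by rw [Int.negSucc_eq]; omega]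
        rfl
  refine ⟨z, hz, hlt, fun i => ?_⟩
  have h := pvTestBit_band c 4294967295 i
  rw [hz, hmask] at h
  simpa [Int.testBit] using h

theorem pvBCsum (k : Nat) : ∀ z : Nat, z < 2 ^ k →
    ((PySem.Int.bitCount (z : Int) : Int)) =
      ((List.range k).map (fun i => if z.testBit i then (1 : Int) else 0)).sum := by
  induction k with
  | zero =>
    intro z hz
    interval_cases z
    simp [PySem.Int.bitCount_zero]
  | succ k ih =>
    intro z hz
    by_cases h0 : z = 0
    · subst h0; simp [PySem.Int.bitCount_zero]
    · have hpos : 0 < z := Nat.pos_of_ne_zero h0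
      rw [PySem.Int.bitCount_natCast hpos]
      have hdiv : z / 2 < 2 ^ k := by
        have : 2 ^ (k + 1) = 2 * 2 ^ k := by ring
        omega
      rw [List.range_succ_eq_map, List.map_cons, List.sum_cons, List.map_map]
      have hfun : ((fun i => if z.testBit i then (1 : Int) else 0) ∘ Nat.succ)
          = fun i => if (z / 2).testBit i then (1 : Int) else 0 := by
        funext i
        simp [Function.comp, Nat.testBit_add_one]
      rw [hfun, ← ih (z / 2) hdiv]
      push_cast
      rcases Nat.mod_two_eq_zero_or_one z with h2 | h2 <;>
        simp [Nat.testBit_zero, h2] <;> omega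

theorem pvA (a b : Int) : count_gpk a b =
    (((List.range 32).map (fun i => if a.testBit i && b.testBit i then (1 : Int) else 0)).sum,
     ((List.range 32).map (fun i => if !(a.testBit i && b.testBit i) && !(!a.testBit i && !b.testBit i) then (1 : Int) else 0)).sum,
     ((List.range 32).map (fun i => if !a.testBit i && !b.testBit i then (1 : Int) else 0)).sum) := by
  unfold count_gpk
  rw [PySem.List.pyRange_one]
  rw [show ((32 : Int) - 0).toNat = 32 from by decide]
  rw [List.foldl_map]
  rw [PySem.List.foldl_congr_mem _ _
      (fun (s : Int × Int × Int) (k : Nat) =>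
        (s.1 + (if a.testBit k && b.testBit k then (1 : Int) else 0),
         s.2.1 + (if !(a.testBit k && b.testBit k) && !(!a.testBit k && !b.testBit k) then (1 : Int) else 0),
         s.2.2 + (if !a.testBit k && !b.testBit k then (1 : Int) else 0))) _
      (by
        intro s k _
        show (let ab := PySem.Int.band (a >>> ((((0 : Int) + (k : Int)).toNat : Int))) 1
              let bb := PySem.Int.band (b >>> ((((0 : Int) + (k : Int)).toNat : Int))) 1
              if ab = 1 ∧ bb = 1 then (s.1 + 1, s.2.1, s.2.2)
              else if ab = 0 ∧ bb = 0 then (s.1, s.2.1, s.2.2 + 1)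
              else (s.1, s.2.1 + 1, s.2.2)) = _
        have hk : ((((0 : Int) + (k : Int)).toNat : Int)) = (k : Int) := by omega
        simp only [hk, pvBandShift]
        cases ha : a.testBit k <;> cases hb : b.testBit k <;> simp)]
  rw [PySem.List.foldl_prod_mk
      (f := fun (x : Int) (k : Nat) => x + (if a.testBit k && b.testBit k then (1 : Int) else 0))
      (g := fun (y : Int × Int) (k : Nat) =>
        (y.1 + (if !(a.testBit k && b.testBit k) && !(!a.testBit k && !b.testBit k) then (1 : Int) else 0),
         y.2 + (if !a.testBit k && !b.testBit k then (1 : Int) else 0)))]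
  rw [PySem.List.foldl_prod_mk
      (f := fun (x : Int) (k : Nat) => x + (if !(a.testBit k && b.testBit k) && !(!a.testBit k && !b.testBit k) then (1 : Int) else 0))
      (g := fun (y : Int) (k : Nat) => y + (if !a.testBit k && !b.testBit k then (1 : Int) else 0))]
  rw [PySem.List.foldl_add, PySem.List.foldl_add, PySem.List.foldl_add]
  simp

theorem pvBG (a b : Int) :
    ((PySem.Int.bitCount (PySem.Int.band (PySem.Int.band a b) 4294967295) : Int)) =
      ((List.range 32).map (fun i => if a.testBit i && b.testBit i then (1 : Int) else 0)).sum := by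
  obtain ⟨z, hz, hlt, hbits⟩ := pvMask (PySem.Int.band a b)
  rw [hz, pvBCsum 32 z hlt]
  refine congrArg List.sum (List.map_congr_left fun i hi => ?_)
  have hi32 : i < 32 := List.mem_range.mp hi
  rw [hbits i, pvTestBit_band]
  simp [hi32]

theorem pvBK (a b : Int) :
    ((PySem.Int.bitCount (PySem.Int.band (PySem.Int.band (Int.not a) (Int.not b)) 4294967295) : Int)) =
      ((List.range 32).map (fun i => if !a.testBit i && !b.testBit i then (1 : Int) else 0)).sum := by
  obtain ⟨z, hz, hlt, hbits⟩ := pvMask (PySem.Int.band (Int.not a) (Int.not b))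
  rw [hz, pvBCsum 32 z hlt]
  refine congrArg List.sum (List.map_congr_left fun i hi => ?_)
  have hi32 : i < 32 := List.mem_range.mp hi
  rw [hbits i, pvTestBit_band, pvTestBit_not, pvTestBit_not]
  simp [hi32]

theorem pvTotal (a b : Int) :
    ((List.range 32).map (fun i => if a.testBit i && b.testBit i then (1 : Int) else 0)).sum +
    ((List.range 32).map (fun i => if !(a.testBit i && b.testBit i) && !(!a.testBit i && !b.testBit i) then (1 : Int) else 0)).sum +
    ((List.range 32).map (fun i => if !a.testBit i && !b.testBit i then (1 : Int) else 0)).sum = 32 := by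
  rw [← PySem.List.sum_map_add_int, ← PySem.List.sum_map_add_int]
  have h : (List.range 32).map (fun i =>
      ((if a.testBit i && b.testBit i then (1 : Int) else 0) +
        (if !(a.testBit i && b.testBit i) && !(!a.testBit i && !b.testBit i) then (1 : Int) else 0)) +
        (if !a.testBit i && !b.testBit i then (1 : Int) else 0))
      = (List.range 32).map (fun _ => (1 : Int)) := by
    refine List.map_congr_left fun i _ => ?_
    cases a.testBit i <;> cases b.testBit i <;> simp
  rw [h, PySem.List.sum_map_const_int]
  simp

theorem pvMain (a b : Int) : count_gpk a b = count_gpk_alt a b := by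
  rw [pvA]
  show _ = count_gpk_alt a b
  simp only [count_gpk_alt]
  rw [pvBG a b, pvBK a b]
  refine Prod.ext rfl (Prod.ext ?_ rfl)
  have h := pvTotal a b
  dsimp only
  linarith

-- ===== VERDICT (by name: the statement is the Claim_ definition above) =====
theorem count_gpk_spec : Claim_equal_count_gpk := by
  intro a_val b_val _
  show count_gpk a_val b_val = count_gpk_alt a_val b_val
  exact pvMain a_val b_val
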